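-- pv_equiv track=rewrite | github.com/Hi-i-am-Akatosh/CursoPython | Practicos/EjerciciosPractica2.py | Multiplo
-- ===== SOURCE A (Python) =====
-- def Multiplo(n1,n2,list):
--     if n1 >= 1:
--         n1 = n1-1
--         val = 5 * n2
--         list.append(val)
--         n2 = n2 + 1
--         Multiplo(n1,n2,list)
--         return list
--     else:
--         return
-- ===== SOURCE B (Python) =====
-- def Multiplo(n1, n2, list):
--     if n1 < 1:
--         return
--     while n1 >= 1:
--         list.append(5 * n2)
--         n2 = n2 + 1
--         n1 = n1 - 1
--     return list
-- ===== Notes on version B (the rewrite author's own statement) =====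
-- stated objective: idiomatic
-- what changed: Replaces the non-tail recursion (which rebuilds and returns the list through the recursive call) with an explicit while loop that appends in place and returns the list once.
import Mathlib
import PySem

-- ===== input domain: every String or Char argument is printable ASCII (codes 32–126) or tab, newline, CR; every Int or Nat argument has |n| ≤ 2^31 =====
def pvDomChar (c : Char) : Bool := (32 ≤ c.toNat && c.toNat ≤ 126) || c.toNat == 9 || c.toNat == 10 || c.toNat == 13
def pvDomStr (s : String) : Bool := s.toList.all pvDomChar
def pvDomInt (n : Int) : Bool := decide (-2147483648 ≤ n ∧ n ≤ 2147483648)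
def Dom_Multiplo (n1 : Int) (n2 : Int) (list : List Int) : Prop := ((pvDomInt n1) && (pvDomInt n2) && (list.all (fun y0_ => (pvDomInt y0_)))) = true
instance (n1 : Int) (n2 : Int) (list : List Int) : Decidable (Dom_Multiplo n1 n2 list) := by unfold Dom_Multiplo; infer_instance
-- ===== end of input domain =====

-- B rewrites A's non-tail recursion as an iterative append loop (idiomatic; return value only — both mutate the passed list in Python).

-- ===== PORT A =====
-- A's recursion: if n1 >= 1, append 5*n2, recurse on (n1-1, n2+1) mutating the same list
-- (modelled by taking the recursive call's list when it returns one, else the list appended so far), return the list; else return None.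
def Multiplo (n1 : Int) (n2 : Int) (list : List Int) : Option (List Int) :=
  if h : n1 ≥ 1 then
    let val := 5 * n2
    let list' := list ++ [val]
    some ((Multiplo (n1 - 1) (n2 + 1) list').getD list')
  else
    none
termination_by n1.toNat
decreasing_by omega

-- ===== PORT B =====
-- B's while loop, counted by the remaining iterations n1.toNat.
def MultiploLoop : Nat → Int → List Int → List Int
  | 0, _, acc => acc
  | k + 1, n2, acc => MultiploLoop k (n2 + 1) (acc ++ [5 * n2])

def Multiplo_alt (n1 : Int) (n2 : Int) (list : List Int) : Option (List Int) :=
  if n1 < 1 then none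
  else some (MultiploLoop n1.toNat n2 list)

-- ===== PRECONDITION & SPEC =====
-- Pre_ excludes exactly n1 ≥ 998, where A's recursion exceeds CPython's default recursion
-- limit and raises RecursionError (A returns normally for every n1 ≤ 997).
def Pre_Multiplo (n1 : Int) (_n2 : Int) (_list : List Int) : Prop := n1 ≤ 997
instance (n1 : Int) (n2 : Int) (list : List Int) : Decidable (Pre_Multiplo n1 n2 list) := by unfold Pre_Multiplo; infer_instance
def pvWitness_Multiplo : Int × Int × List Int := (3, 2, [1])

def Spec_Multiplo (n1 : Int) (n2 : Int) (list : List Int) (out : Option (List Int)) : Prop := out = Multiplo_alt n1 n2 list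
instance (n1 : Int) (n2 : Int) (list : List Int) (out : Option (List Int)) : Decidable (Spec_Multiplo n1 n2 list out) := by unfold Spec_Multiplo; infer_instance

-- ===== CLAIM (what is proved, stated in full; the proofs are below) =====
def Claim_equal_Multiplo : Prop := ∀ (n1 : Int) (n2 : Int) (list : List Int), Dom_Multiplo n1 n2 list → Pre_Multiplo n1 n2 list → Spec_Multiplo n1 n2 list (Multiplo n1 n2 list)

-- ===== LEMMAS AND PROOFS =====
lemma Multiplo_pos (k : Nat) : ∀ (n1 n2 : Int) (list : List Int), n1.toNat = k → 1 ≤ n1 →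
    Multiplo n1 n2 list = some (MultiploLoop k n2 list) := by
  induction k with
  | zero => intro n1 n2 list hk h1; omega
  | succ k ih =>
    intro n1 n2 list hk h1
    rw [Multiplo]
    simp only [h1, dite_true]
    by_cases h2 : 1 ≤ n1 - 1
    · rw [ih (n1 - 1) (n2 + 1) (list ++ [5 * n2]) (by omega) h2]
      rfl
    · have hk0 : k = 0 := by omega
      rw [Multiplo]
      simp [h2, hk0, MultiploLoop]

-- ===== VERDICT (by name: the statement is the Claim_ definition above) =====
theorem Multiplo_spec : Claim_equal_Multiplo := by
  intro n1 n2 list _ _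
  unfold Spec_Multiplo Multiplo_alt
  by_cases h : 1 ≤ n1
  · rw [Multiplo_pos n1.toNat n1 n2 list rfl h]
    simp [show ¬ n1 < 1 by omega]
  · rw [Multiplo]
    simp [h, show n1 < 1 by omega]
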